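-- pv_equiv track=rewrite | github.com/flightaware/tohil | tests/test_subinterpreters.py | d4
-- ===== SOURCE A (Python) =====
-- def d4(depth: int, width: int, in_list: list = list()):
--     """ return a list of lists of tcl subinterpreter names for the
--     specified depth and width.  note that to make an "x0 x0 x0" one
--     must have made "x0 x0" a 3 x 3 makes 39 subinterpreters; a
--     4x4 makes 390. the ordering will be correct that no tcl child
--     interpreter will be created without all needed parents having
--     been created first"""
--     depth -= 1
--     new = list()
--     for w in range(width):
--         piece = in_list.copy()
--         piece.append('x' + str(w))
--         new.append(piece)
--         if depth > 0:
--             new.extend(d4(depth, width, in_list = piece))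
--     return new
-- ===== SOURCE B (Python) =====
-- def d4(depth: int, width: int, in_list: list = list()):
--     """Iterative version: explicit stack of (prefix, remaining_depth) frames
--     replaces the recursion, preserving DFS pre-order by pushing children in
--     reverse width order."""
--     result = []
--     stack = []
--     for w in reversed(range(width)):
--         stack.append((in_list.copy() + ['x' + str(w)], depth - 1))
--     while stack:
--         piece, d = stack.pop()
--         result.append(piece)
--         if d > 0:
--             for w in reversed(range(width)):
--                 stack.append((piece + ['x' + str(w)], d - 1))
--     return result
-- ===== Notes on version B (the rewrite author's own statement) =====
-- stated objective: alternative
-- what changed: Replaced A's recursion with an iterative DFS using an explicit stack of (prefix, remaining-depth) frames, pushing children in reverse width order to preserve pre-order; Pre_ excludes width >= 1 with depth > 997, exactly where A's recursion overruns Python's recursion limit (RecursionError).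
import Mathlib
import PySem

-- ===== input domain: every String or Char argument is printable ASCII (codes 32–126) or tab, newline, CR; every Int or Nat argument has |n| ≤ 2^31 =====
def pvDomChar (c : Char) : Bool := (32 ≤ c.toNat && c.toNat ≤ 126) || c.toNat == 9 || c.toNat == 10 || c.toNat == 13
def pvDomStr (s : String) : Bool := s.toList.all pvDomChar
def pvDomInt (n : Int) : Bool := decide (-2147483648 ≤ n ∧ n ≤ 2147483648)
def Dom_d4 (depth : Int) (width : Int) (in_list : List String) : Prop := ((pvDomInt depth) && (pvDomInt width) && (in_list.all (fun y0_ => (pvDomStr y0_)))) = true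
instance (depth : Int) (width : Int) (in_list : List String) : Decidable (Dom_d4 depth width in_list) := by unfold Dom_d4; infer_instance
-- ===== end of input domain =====

-- B replaces A's recursion by an explicit stack of (prefix, remaining-depth) frames,
-- pushing children in reverse width order to keep the DFS pre-order (objective: alternative).

-- ===== PORT A =====
-- the body of A's `for w in range(width)` loop, with the recursive call; `depth` is
-- already the decremented depth of A's enclosing call
def d4Go (depth : Int) (width : Int) (ws : List Int) (in_list : List String) : List (List String) :=
  match ws with
  | [] => []
  | w :: rest =>
    let piece := in_list ++ ["x" ++ PySem.Int.toStr w]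
    (piece :: (if depth > 0 then d4Go (depth - 1) width (PySem.List.pyRange 0 width 1) piece else []))
      ++ d4Go depth width rest in_list
termination_by (depth.toNat, ws.length)
decreasing_by
  · apply Prod.Lex.left; omega
  · apply Prod.Lex.right; simp

def d4 (depth : Int) (width : Int) (in_list : List String) : List (List String) :=
  d4Go (depth - 1) width (PySem.List.pyRange 0 width 1) in_list

-- ===== PORT B =====
-- `for w in reversed(range(width)): stack.append((p + ['x'+str(w)], d))`, stack head = top
def pushFrames (width : Int) (p : List String) (d : Int)
    (stack : List (List String × Int)) : List (List String × Int) :=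
  (PySem.List.pyRange 0 width 1).reverse.foldl
    (fun st w => (p ++ ["x" ++ PySem.Int.toStr w], d) :: st) stack

def stackMeasure (width : Int) (st : List (List String × Int)) : Nat :=
  (st.map (fun f => (width.toNat + 1) ^ f.2.toNat)).sum

theorem stackMeasure_pushFrames (width : Int) (p : List String) (d : Int)
    (st : List (List String × Int)) :
    stackMeasure width (pushFrames width p d st)
      = width.toNat * (width.toNat + 1) ^ d.toNat + stackMeasure width st := by
  unfold pushFrames
  have h : ∀ (l : List Int) (st : List (List String × Int)),
      stackMeasure width (l.foldl (fun st w => (p ++ ["x" ++ PySem.Int.toStr w], d) :: st) st)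
        = l.length * (width.toNat + 1) ^ d.toNat + stackMeasure width st := by
    intro l
    induction l with
    | nil => intro st; simp
    | cons a l ih =>
      intro st
      rw [List.foldl_cons, ih]
      simp only [stackMeasure, List.map_cons, List.sum_cons, List.length_cons]
      ring
  rw [h]
  simp [PySem.List.length_pyRange_one]

theorem pushFrames_decreases (width : Int) (p : List String) (d : Int)
    (st : List (List String × Int)) (hd : d > 0) :
    stackMeasure width (pushFrames width p (d - 1) st)
      < stackMeasure width ((p, d) :: st) := by
  rw [stackMeasure_pushFrames]
  simp only [stackMeasure, List.map_cons, List.sum_cons]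
  have hdt : d.toNat = (d - 1).toNat + 1 := by omega
  rw [hdt, pow_succ]
  have hx : 0 < (width.toNat + 1) ^ (d - 1).toNat := pow_pos (by omega) _
  set X := (width.toNat + 1) ^ (d - 1).toNat
  have : width.toNat * X < X * (width.toNat + 1) := by nlinarith
  omega

def loopB (width : Int) (stack : List (List String × Int))
    (result : List (List String)) : List (List String) :=
  match stack with
  | [] => result
  | (piece, d) :: rest =>
    let result := result ++ [piece]
    let stack := if d > 0 then pushFrames width piece (d - 1) rest else rest
    loopB width stack result
termination_by stackMeasure width stack
decreasing_by
  split
  · exact pushFrames_decreases width piece d rest (by omega)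
  · simp only [stackMeasure, List.map_cons, List.sum_cons]
    have : 0 < (width.toNat + 1) ^ d.toNat := pow_pos (by omega) _
    omega

def d4_alt (depth : Int) (width : Int) (in_list : List String) : List (List String) :=
  loopB width (pushFrames width in_list (depth - 1) []) []

-- ===== PRECONDITION & SPEC =====
-- Pre_ excludes inputs with width >= 1 and depth > 997: there A's recursion nests `depth` deep
-- and exceeds Python's recursion limit (RecursionError, observed from depth 998).
def Pre_d4 (depth : Int) (width : Int) (in_list : List String) : Prop :=
  width ≤ 0 ∨ depth ≤ 997
instance (depth : Int) (width : Int) (in_list : List String) : Decidable (Pre_d4 depth width in_list) := by unfold Pre_d4; infer_instance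
def pvWitness_d4 : Int × Int × List String := (3, 2, ["a"])

def Spec_d4 (depth : Int) (width : Int) (in_list : List String) (out : List (List String)) : Prop := out = d4_alt depth width in_list
instance (depth : Int) (width : Int) (in_list : List String) (out : List (List String)) : Decidable (Spec_d4 depth width in_list out) := by unfold Spec_d4; infer_instance

-- ===== CLAIM (what is proved, stated in full; the proofs are below) =====
def Claim_equal_d4 : Prop := ∀ (depth : Int) (width : Int) (in_list : List String), Dom_d4 depth width in_list → Pre_d4 depth width in_list → Spec_d4 depth width in_list (d4 depth width in_list)

-- ===== LEMMAS AND PROOFS =====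

-- what a single stack frame contributes to the output
def emitF (width : Int) (f : List String × Int) : List (List String) :=
  f.1 :: (if f.2 > 0 then d4Go (f.2 - 1) width (PySem.List.pyRange 0 width 1) f.1 else [])

theorem d4Go_flatMap (depth width : Int) (ws : List Int) (in_list : List String) :
    d4Go depth width ws in_list
      = ws.flatMap (fun w => emitF width (in_list ++ ["x" ++ PySem.Int.toStr w], depth)) := by
  induction ws with
  | nil => simp [d4Go]
  | cons w rest ih =>
    rw [d4Go, List.flatMap_cons, ← ih]
    rfl

theorem pushFrames_flatMap (width : Int) (p : List String) (d : Int)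
    (st : List (List String × Int)) :
    (pushFrames width p d st).flatMap (emitF width)
      = (PySem.List.pyRange 0 width 1).flatMap
          (fun w => emitF width (p ++ ["x" ++ PySem.Int.toStr w], d))
        ++ st.flatMap (emitF width) := by
  unfold pushFrames
  generalize PySem.List.pyRange 0 width 1 = l
  induction l generalizing st with
  | nil => simp
  | cons a l ih =>
    rw [List.reverse_cons, List.foldl_append]
    simp only [List.foldl_cons, List.foldl_nil, ih, List.flatMap_cons, List.flatMap_cons,
      List.append_assoc]

theorem loopB_flatMap (width : Int) :
    ∀ (n : Nat) (st : List (List String × Int)) (res : List (List String)),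
      stackMeasure width st = n →
      loopB width st res = res ++ st.flatMap (emitF width) := by
  intro n
  induction n using Nat.strong_induction_on with
  | _ n ih =>
    intro st res hm
    match st with
    | [] => simp [loopB]
    | (p, d) :: rest =>
      rw [loopB]
      by_cases hd : d > 0
      · rw [if_pos hd,
          ih (stackMeasure width (pushFrames width p (d - 1) rest))
            (by rw [← hm]; exact pushFrames_decreases width p d rest hd) _ _ rfl]
        rw [pushFrames_flatMap, ← d4Go_flatMap]
        simp only [List.flatMap_cons, emitF, if_pos hd]
        simp
      · rw [if_neg hd,
          ih (stackMeasure width rest)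
            (by rw [← hm]; simp only [stackMeasure, List.map_cons, List.sum_cons]
                have : 0 < (width.toNat + 1) ^ d.toNat := pow_pos (by omega) _
                omega) _ _ rfl]
        simp only [List.flatMap_cons, emitF, if_neg hd]
        simp

-- ===== VERDICT (by name: the statement is the Claim_ definition above) =====
theorem d4_spec : Claim_equal_d4 := by
  intro depth width in_list _ _
  unfold Spec_d4 d4 d4_alt
  rw [loopB_flatMap width _ _ _ rfl, pushFrames_flatMap, d4Go_flatMap]
  simp
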